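-- pv_equiv track=rewrite | github.com/drinkcat/simple-serac | simple_utils.py | human_size_2
-- ===== SOURCE A (Python) =====
-- SIZE_SUFFIXES = ['B', 'KiB', 'MiB', 'GiB']
--
-- def human_size_2(size, total):
--     i = 0
--     while total >= 1024 and i < len(SIZE_SUFFIXES)-1:
--         total = total // 1024
--         size = size // 1024
--         i += 1
--     stotal = str(total)
--     ssize = str(size).rjust(len(stotal), " ")
--     return f"{ssize} / {stotal} {SIZE_SUFFIXES[i]}"
-- ===== SOURCE B (Python) =====
-- SIZE_SUFFIXES = ['B', 'KiB', 'MiB', 'GiB']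
--
-- def human_size_2(size, total):
--     # closed-form unit index instead of a repeated-division loop
--     if total >= 1024 ** 3:
--         i = 3
--     elif total >= 1024 ** 2:
--         i = 2
--     elif total >= 1024:
--         i = 1
--     else:
--         i = 0
--     d = 1024 ** i
--     stotal = str(total // d)
--     ssize = str(size // d).rjust(len(stotal), " ")
--     return f"{ssize} / {stotal} {SIZE_SUFFIXES[i]}"
-- ===== Notes on version B (the rewrite author's own statement) =====
-- stated objective: simpler
-- what changed: Replaced the while-loop that repeatedly floor-divides total and size by 1024 while counting i with a closed-form threshold chain picking the unit index i directly, then a single division of both values by 1024**i.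
import Mathlib
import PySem

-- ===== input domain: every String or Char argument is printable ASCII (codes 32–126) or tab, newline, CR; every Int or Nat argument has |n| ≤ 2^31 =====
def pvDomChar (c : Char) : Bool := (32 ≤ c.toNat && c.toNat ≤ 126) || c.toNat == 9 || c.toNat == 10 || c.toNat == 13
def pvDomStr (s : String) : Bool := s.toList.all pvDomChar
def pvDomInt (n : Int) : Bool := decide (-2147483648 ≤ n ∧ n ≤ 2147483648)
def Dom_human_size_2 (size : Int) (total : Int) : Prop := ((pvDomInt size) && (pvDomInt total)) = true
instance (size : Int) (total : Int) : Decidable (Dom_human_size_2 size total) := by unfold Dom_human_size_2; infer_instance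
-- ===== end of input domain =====

-- B replaces A's repeated-division while-loop by a closed-form threshold chain for the unit
-- index and one division; objective: simpler.

-- shared formatting of the final f-string line (identical in both Pythons):
-- ssize.rjust(len(stotal)) ++ " / " ++ stotal ++ " " ++ SIZE_SUFFIXES[i]
def pvFmt (size : Int) (total : Int) (i : Nat) : String :=
  let stotal := PySem.Int.toChars total
  let ssize := PySem.Int.toChars size
  let padded := List.replicate (stotal.length - ssize.length) ' ' ++ ssize
  String.ofList (padded ++ (' ' :: '/' :: ' ' :: stotal) ++
    (' ' :: (["B", "KiB", "MiB", "GiB"].getD i "").toList))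

-- ===== PORT A =====
-- the while loop: total//=1024; size//=1024; i+=1  while total >= 1024 and i < 3
def pvLoopA (size : Int) (total : Int) (i : Nat) : Int × Int × Nat :=
  if 1024 ≤ total ∧ i < 3 then
    pvLoopA (PySem.Int.floordiv size 1024) (PySem.Int.floordiv total 1024) (i + 1)
  else (size, total, i)
termination_by 3 - i

def human_size_2 (size : Int) (total : Int) : String :=
  let r := pvLoopA size total 0
  pvFmt r.1 r.2.1 r.2.2

-- ===== PORT B =====
def human_size_2_alt (size : Int) (total : Int) : String :=
  let i : Nat :=
    if (1024:Int) ^ 3 ≤ total then 3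
    else if (1024:Int) ^ 2 ≤ total then 2
    else if (1024:Int) ≤ total then 1
    else 0
  let d : Int := 1024 ^ i
  pvFmt (PySem.Int.floordiv size d) (PySem.Int.floordiv total d) i

-- ===== PRECONDITION & SPEC =====
def Spec_human_size_2 (size : Int) (total : Int) (out : String) : Prop := out = human_size_2_alt size total
instance (size : Int) (total : Int) (out : String) : Decidable (Spec_human_size_2 size total out) := by unfold Spec_human_size_2; infer_instance

-- ===== CLAIM (what is proved, stated in full; the proofs are below) =====
def Claim_equal_human_size_2 : Prop := ∀ (size : Int) (total : Int), Dom_human_size_2 size total → Spec_human_size_2 size total (human_size_2 size total)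

-- ===== LEMMAS AND PROOFS =====

lemma pvLoopA_eq (size total : Int) :
    pvLoopA size total 0 =
      (if (1024:Int) ^ 3 ≤ total then
        (PySem.Int.floordiv size (1024 ^ 3), PySem.Int.floordiv total (1024 ^ 3), (3:Nat))
      else if (1024:Int) ^ 2 ≤ total then
        (PySem.Int.floordiv size (1024 ^ 2), PySem.Int.floordiv total (1024 ^ 2), 2)
      else if (1024:Int) ≤ total then
        (PySem.Int.floordiv size (1024 ^ 1), PySem.Int.floordiv total (1024 ^ 1), 1)
      else (PySem.Int.floordiv size (1024 ^ 0), PySem.Int.floordiv total (1024 ^ 0), 0)) := by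
  have hd : ∀ a : Int, ∀ b : Int, 0 < b → PySem.Int.floordiv a b = a / b := by
    intro a b hb; exact PySem.Int.floordiv_eq_ediv_of_pos hb
  by_cases h3 : (1024:Int) ^ 3 ≤ total
  · rw [pvLoopA, if_pos ⟨by nlinarith, by norm_num⟩]
    rw [pvLoopA, if_pos ⟨by rw [hd _ _ (by norm_num)]; omega, by norm_num⟩]
    rw [pvLoopA, if_pos ⟨by rw [hd _ _ (by norm_num), hd _ _ (by norm_num)]; omega, by norm_num⟩]
    rw [pvLoopA, if_neg (by omega), if_pos h3]
    simp only [hd _ _ (show (0:Int) < 1024 by norm_num),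
      hd _ _ (show (0:Int) < 1024 ^ 3 by norm_num)]
    refine Prod.ext ?_ (Prod.ext ?_ rfl) <;> simp <;> omega
  · by_cases h2 : (1024:Int) ^ 2 ≤ total
    · rw [pvLoopA, if_pos ⟨by nlinarith, by norm_num⟩]
      rw [pvLoopA, if_pos ⟨by rw [hd _ _ (by norm_num)]; omega, by norm_num⟩]
      rw [pvLoopA, if_neg (by
        rw [hd _ _ (show (0:Int) < 1024 by norm_num), hd _ _ (show (0:Int) < 1024 by norm_num)]
        intro ⟨h, _⟩; apply h3; nlinarith [Int.ediv_mul_le (total / 1024) (show (1024:Int) ≠ 0 by norm_num),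
          Int.ediv_mul_le total (show (1024:Int) ≠ 0 by norm_num)])]
      rw [if_neg h3, if_pos h2]
      simp only [hd _ _ (show (0:Int) < 1024 by norm_num),
        hd _ _ (show (0:Int) < 1024 ^ 2 by norm_num)]
      refine Prod.ext ?_ (Prod.ext ?_ rfl) <;> simp <;> omega
    · by_cases h1 : (1024:Int) ≤ total
      · rw [pvLoopA, if_pos ⟨h1, by norm_num⟩]
        rw [pvLoopA, if_neg (by
          rw [hd _ _ (show (0:Int) < 1024 by norm_num)]
          intro ⟨h, _⟩; apply h2; nlinarith [Int.ediv_mul_le total (show (1024:Int) ≠ 0 by norm_num)])]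
        rw [if_neg h3, if_neg h2, if_pos h1]
        norm_num
      · rw [pvLoopA, if_neg (by omega), if_neg h3, if_neg h2, if_neg h1]
        simp [pow_zero]

-- ===== VERDICT (by name: the statement is the Claim_ definition above) =====
theorem human_size_2_spec : Claim_equal_human_size_2 := by
  intro size total _
  unfold Spec_human_size_2 human_size_2 human_size_2_alt
  rw [pvLoopA_eq]
  split_ifs <;> rfl
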